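-- pv_equiv track=rewrite | github.com/alchemyplatform/docs | script.py | process_method_block
-- ===== SOURCE A (Python) =====
-- def process_method_block(block_lines):
--     has_description = any(
--         l.lstrip().startswith("description:") and (len(l) - len(l.lstrip())) <= 2
--         for l in block_lines
--     )
--     new_block = []
--
--     if has_description:
--         return block_lines
--
--     for line in block_lines:
--         stripped = line.lstrip()
--         if stripped.startswith("summary:"):
--             indent = line[:len(line) - len(stripped)]
--             new_block.append(indent + "description:" + line[len(indent) + len("summary:"):])
--         else:
--             new_block.append(line)
--
--     return new_block
-- ===== SOURCE B (Python) =====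
-- def process_method_block(block_lines):
--     # Single pass: bail out with the untouched input as soon as a top-level
--     # description line is seen; otherwise rewrite summary lines on the fly.
--     out = []
--     for line in block_lines:
--         s = line.lstrip()
--         if s.startswith("description:") and len(line) - len(s) <= 2:
--             return block_lines
--         if s.startswith("summary:"):
--             out.append(line[:len(line) - len(s)] + "description:" + s[len("summary:"):])
--         else:
--             out.append(line)
--     return out
-- ===== Notes on version B (the rewrite author's own statement) =====
-- stated objective: simpler
-- what changed: Replaced A's two-phase scan-then-rebuild (an any() pass over all lines followed by a separate rewrite loop) with a single pass that returns the original list early upon seeing a top-level description line and otherwise rewrites summary lines on the fly.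
import Mathlib
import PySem

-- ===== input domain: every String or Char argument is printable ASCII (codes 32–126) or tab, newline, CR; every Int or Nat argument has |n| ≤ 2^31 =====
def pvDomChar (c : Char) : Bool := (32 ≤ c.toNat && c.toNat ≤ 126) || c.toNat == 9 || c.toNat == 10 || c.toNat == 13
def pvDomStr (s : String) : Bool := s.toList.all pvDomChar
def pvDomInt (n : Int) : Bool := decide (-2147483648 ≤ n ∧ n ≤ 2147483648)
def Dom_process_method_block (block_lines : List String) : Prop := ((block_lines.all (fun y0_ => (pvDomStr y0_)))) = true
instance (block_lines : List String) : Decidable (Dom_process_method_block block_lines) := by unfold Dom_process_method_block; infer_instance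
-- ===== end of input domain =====

-- B changes the structure only: one pass with early return instead of A's any()-scan followed by a rebuild loop; same values.

-- ===== PORT A =====
-- line.lstrip().startswith("description:") and (len(line) - len(line.lstrip())) <= 2
def pmbHasDesc (line : String) : Bool :=
  PySem.Str.startswith (PySem.Str.lstrip line) "description:" &&
    decide ((PySem.Str.len line : Int) - (PySem.Str.len (PySem.Str.lstrip line) : Int) ≤ 2)

-- A's loop body: rewrite a summary line (string concatenation is exact on code points, done via toList/ofList)
def pmbRewriteA (line : String) : String :=
  let stripped := PySem.Str.lstrip line
  if PySem.Str.startswith stripped "summary:" then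
    String.ofList ((PySem.Str.slice line none (some ((PySem.Str.len line : Int) - (PySem.Str.len stripped : Int)))).toList
      ++ "description:".toList
      ++ (PySem.Str.slice line (some ((PySem.Str.len line : Int) - (PySem.Str.len stripped : Int) + 8)) none).toList)
  else line

def process_method_block (block_lines : List String) : List String :=
  let has_description := block_lines.any pmbHasDesc
  if has_description then block_lines
  else block_lines.foldl (fun new_block line => new_block ++ [pmbRewriteA line]) []

-- ===== PORT B =====
-- B's loop body: line[:len(line)-len(s)] + "description:" + s[8:]
def pmbRewriteB (line stripped : String) : String :=
  String.ofList ((PySem.Str.slice line none (some ((PySem.Str.len line : Int) - (PySem.Str.len stripped : Int)))).toList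
    ++ "description:".toList
    ++ (PySem.Str.slice stripped (some (8 : Int)) none).toList)

def pmbGo (orig : List String) (acc : List String) : List String → List String
  | [] => acc
  | line :: rest =>
    let s := PySem.Str.lstrip line
    if PySem.Str.startswith s "description:" &&
        decide ((PySem.Str.len line : Int) - (PySem.Str.len s : Int) ≤ 2) then orig
    else if PySem.Str.startswith s "summary:" then
      pmbGo orig (acc ++ [pmbRewriteB line s]) rest
    else
      pmbGo orig (acc ++ [line]) rest

def process_method_block_alt (block_lines : List String) : List String :=
  pmbGo block_lines [] block_lines

-- ===== PRECONDITION & SPEC =====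
def Spec_process_method_block (block_lines : List String) (out : List String) : Prop := out = process_method_block_alt block_lines
instance (block_lines : List String) (out : List String) : Decidable (Spec_process_method_block block_lines out) := by unfold Spec_process_method_block; infer_instance

-- ===== CLAIM (what is proved, stated in full; the proofs are below) =====
def Claim_equal_process_method_block : Prop := ∀ (block_lines : List String), Dom_process_method_block block_lines → Spec_process_method_block block_lines (process_method_block block_lines)

-- ===== LEMMAS AND PROOFS =====

-- lstrip (= dropWhile isspace) is the suffix of the line obtained by dropping the indent
lemma lstrip_eq_drop (line : String) :
    (PySem.Str.lstrip line).toList = line.toList.drop (line.toList.length - (PySem.Str.lstrip line).toList.length) := by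
  rw [PySem.Str.toList_lstrip]
  show PySem.Chars.lstrip line.toList = _
  unfold PySem.Chars.lstrip
  obtain ⟨t, ht⟩ := List.dropWhile_suffix (l := line.toList) PySem.Chars.isspace
  set d := List.dropWhile PySem.Chars.isspace line.toList with hd
  rw [← ht]
  simp

lemma lstrip_len_le (line : String) :
    (PySem.Str.lstrip line).toList.length ≤ line.toList.length := by
  rw [PySem.Str.toList_lstrip]
  show (PySem.Chars.lstrip line.toList).length ≤ _
  unfold PySem.Chars.lstrip
  exact (List.dropWhile_suffix _).length_le

-- the tail slice line[len(line)-len(stripped)+8:] in A equals stripped[8:] in B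
lemma rewrite_eq (line : String)
    (h : PySem.Str.startswith (PySem.Str.lstrip line) "summary:" = true) :
    pmbRewriteB line (PySem.Str.lstrip line) = pmbRewriteA line := by
  have hle := lstrip_len_le line
  have htail : (PySem.Str.slice (PySem.Str.lstrip line) (some (8 : Int)) none).toList
      = (PySem.Str.slice line (some ((PySem.Str.len line : Int) - (PySem.Str.len (PySem.Str.lstrip line) : Int) + 8)) none).toList := by
    rw [PySem.Str.toList_slice, PySem.Str.toList_slice, PySem.Chars.slice_eq_listSlice,
        PySem.Chars.slice_eq_listSlice, PySem.Str.len_eq, PySem.Str.len_eq]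
    have h8 : ((line.toList.length : Int) - ((PySem.Str.lstrip line).toList.length : Int) + 8)
        = ((line.toList.length - (PySem.Str.lstrip line).toList.length + 8 : Nat) : Int) := by
      push_cast [Nat.cast_sub hle]; ring
    rw [h8, PySem.List.slice_from_natCast, show ((8:Int)) = ((8:Nat):Int) from rfl,
        PySem.List.slice_from_natCast]
    rw [← List.drop_drop, ← lstrip_eq_drop]
  simp only [pmbRewriteA, pmbRewriteB]
  rw [if_pos h, htail]

lemma go_spec (orig : List String) (rest : List String) : ∀ acc,
    pmbGo orig acc rest = if rest.any pmbHasDesc then orig else acc ++ rest.map pmbRewriteA := by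
  induction rest with
  | nil => intro acc; simp [pmbGo]
  | cons line rest ih =>
    intro acc
    show (if pmbHasDesc line then orig
      else if PySem.Str.startswith (PySem.Str.lstrip line) "summary:" then
        pmbGo orig (acc ++ [pmbRewriteB line (PySem.Str.lstrip line)]) rest
      else pmbGo orig (acc ++ [line]) rest) = _
    by_cases hd : pmbHasDesc line
    · simp [hd]
    · rw [if_neg hd]
      by_cases hs : PySem.Str.startswith (PySem.Str.lstrip line) "summary:" = true
      · rw [if_pos hs, ih, rewrite_eq line hs]
        simp [hd, List.any_cons]
      · rw [if_neg hs, ih]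
        have hline : pmbRewriteA line = line := by
          unfold pmbRewriteA; rw [if_neg hs]
        simp [hd, hline, List.any_cons]

lemma foldl_spec (L : List String) : ∀ acc,
    L.foldl (fun new_block line => new_block ++ [pmbRewriteA line]) acc = acc ++ L.map pmbRewriteA := by
  induction L with
  | nil => intro acc; simp
  | cons line rest ih => intro acc; simp [List.foldl_cons, ih]

-- ===== VERDICT (by name: the statement is the Claim_ definition above) =====
theorem process_method_block_spec : Claim_equal_process_method_block := by
  intro L _
  show process_method_block L = process_method_block_alt L
  simp only [process_method_block, process_method_block_alt]
  rw [go_spec, foldl_spec]
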